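-- pv_equiv track=rewrite | github.com/XyzHuy/-DL-Fine-tuning-coding-model | data/solution/Solution1273.py | deleteTreeNodes
-- ===== SOURCE A (Python) =====
-- from typing import List
-- from collections import defaultdict
--
-- def deleteTreeNodes(nodes: int, parent: List[int], value: List[int]) -> int:
--     # Build the tree as an adjacency list
--     tree = defaultdict(list)
--     for i in range(nodes):
--         if parent[i] != -1:
--             tree[parent[i]].append(i)
--
--     # Function to perform DFS and calculate subtree sums
--     def dfs(node):
--         subtree_sum = value[node]
--         count = 1  # Count this node itself
--
--         for child in tree[node]:
--             child_sum, child_count = dfs(child)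
--             subtree_sum += child_sum
--             count += child_count
--
--         # If the subtree sum is zero, we delete this subtree
--         if subtree_sum == 0:
--             count = 0
--
--         return subtree_sum, count
--
--     # Start DFS from the root node (0)
--     _, remaining_nodes = dfs(0)
--     return remaining_nodes
-- ===== SOURCE B (Python) =====
-- from collections import defaultdict
--
-- def deleteTreeNodes(nodes: int, parent, value) -> int:
--     # Same adjacency map; but an explicit stack-based post-order traversal
--     # from the root 0 instead of recursion.
--     children = defaultdict(list)
--     for i in range(nodes):
--         if parent[i] != -1:
--             children[parent[i]].append(i)
--     total = {}
--     kept = {}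
--     stack = [(0, False)]
--     while stack:
--         node, done = stack.pop()
--         if done:
--             s, k = value[node], 1
--             for c in children[node]:
--                 s += total[c]
--                 k += kept[c]
--             if s == 0:
--                 k = 0
--             total[node] = s
--             kept[node] = k
--         else:
--             stack.append((node, True))
--             for c in children[node]:
--                 stack.append((c, False))
--     return kept[0]
-- ===== Notes on version B (the rewrite author's own statement) =====
-- stated objective: alternative
-- what changed: The recursive dfs is replaced by an explicit stack-based post-order traversal from the root (visit/finalize entries on a stack, per-node sum and kept-count dicts), removing recursion and its depth limit.
import Mathlib
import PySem

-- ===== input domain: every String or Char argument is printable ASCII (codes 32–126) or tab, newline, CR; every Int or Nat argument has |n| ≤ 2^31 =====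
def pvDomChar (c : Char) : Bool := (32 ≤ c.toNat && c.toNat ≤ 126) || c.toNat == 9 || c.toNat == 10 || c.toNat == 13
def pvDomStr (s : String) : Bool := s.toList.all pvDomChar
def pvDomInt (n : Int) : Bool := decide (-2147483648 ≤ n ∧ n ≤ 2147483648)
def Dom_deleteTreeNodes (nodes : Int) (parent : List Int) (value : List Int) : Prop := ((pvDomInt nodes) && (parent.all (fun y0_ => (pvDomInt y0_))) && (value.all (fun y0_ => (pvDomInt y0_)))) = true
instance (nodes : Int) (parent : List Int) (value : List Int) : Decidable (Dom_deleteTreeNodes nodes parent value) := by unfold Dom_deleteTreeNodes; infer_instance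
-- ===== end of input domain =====

-- B replaces A's recursive DFS by an explicit stack-based post-order traversal (objective: alternative;
-- same asymptotic cost, no recursion-depth limit). Return value only; neither version mutates its arguments.

-- ===== PORT A =====
-- both Pythons build the children adjacency map with the same loop (defaultdict(list) + append)
def pvChildMap (nodes : Int) (parent : List Int) : PySem.Dict Int (List Int) :=
  (PySem.List.pyRange 0 nodes 1).foldl
    (fun d i =>
      if PySem.List.pyGetD parent i 0 ≠ -1 then
        d.modify (PySem.List.pyGetD parent i 0) [] (· ++ [i])  -- tree[parent[i]].append(i)
      else d)
    PySem.Dict.empty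

-- A's recursive dfs; fuel is only a termination guard (under Pre_ the recursion depth is ≤ nodes,
-- so fuel = nodes.toNat + 1 is never exhausted); value[node] is total via getD (IndexError excluded by Pre_)
def pvDfsA (tree : PySem.Dict Int (List Int)) (value : List Int) : Nat → Int → Int × Int
  | 0, _ => (0, 0)
  | fuel+1, node =>
    let r := (tree.getD node []).foldl
      (fun acc child =>
        let c := pvDfsA tree value fuel child
        (acc.1 + c.1, acc.2 + c.2))
      (PySem.List.pyGetD value node 0, 1)
    if r.1 = 0 then (r.1, 0) else r

def deleteTreeNodes (nodes : Int) (parent : List Int) (value : List Int) : Int :=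
  (pvDfsA (pvChildMap nodes parent) value (nodes.toNat + 1) 0).2

-- ===== PORT B =====
-- B's while-stack loop; fuel is only a termination guard (under Pre_ the loop pops exactly twice the
-- subtree size of the root, which is at most (nodes+1)^(nodes+1), and ends on the empty stack);
-- dict reads are total via getD (under Pre_ every total[c]/kept[c]/kept[0] read in Python finds its key)
def pvRunB (ch : PySem.Dict Int (List Int)) (value : List Int) :
    Nat → List (Int × Bool) → PySem.Dict Int Int → PySem.Dict Int Int → Int
  | _, [], _, kept => kept.getD 0 0
  | 0, _ :: _, _, kept => kept.getD 0 0
  | fuel+1, (node, done) :: rest, total, kept =>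
    if done then
      let r := (ch.getD node []).foldl
        (fun acc c => (acc.1 + total.getD c 0, acc.2 + kept.getD c 0))
        (PySem.List.pyGetD value node 0, (1 : Int))
      let k := if r.1 = 0 then (0 : Int) else r.2
      pvRunB ch value fuel rest (total.insert node r.1) (kept.insert node k)
    else
      pvRunB ch value fuel
        (((ch.getD node []).reverse.map (fun c => (c, false))) ++ (node, true) :: rest)
        total kept

def deleteTreeNodes_alt (nodes : Int) (parent : List Int) (value : List Int) : Int :=
  pvRunB (pvChildMap nodes parent) value (2 * (nodes.toNat + 1) ^ (nodes.toNat + 1)) [(0, false)]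
    PySem.Dict.empty PySem.Dict.empty

-- ===== PRECONDITION & SPEC =====
-- one step up the parent chain (identity outside [0, nodes)), and its k-fold iterate
def pvStep (nodes : Int) (parent : List Int) (x : Int) : Int :=
  if 0 ≤ x ∧ x < nodes then parent.getD x.toNat 0 else x

def pvChase (nodes : Int) (parent : List Int) : Nat → Int → Int
  | 0, x => x
  | k+1, x => pvChase nodes parent k (pvStep nodes parent x)

-- Pre_ excludes exactly the inputs on which A raises: IndexError (parent shorter than nodes, or value
-- too short for a node whose parent chain reaches the root) and the infinite recursion / RecursionError
-- of a parent-pointer cycle through the root 0.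
def Pre_deleteTreeNodes (nodes : Int) (parent : List Int) (value : List Int) : Prop :=
  (0 < nodes → nodes ≤ (parent.length : Int)) ∧
  0 < value.length ∧
  (∀ k < nodes.toNat + 1, 0 < k → pvChase nodes parent k 0 ≠ 0) ∧
  (∀ j < nodes.toNat, (∃ k < nodes.toNat, pvChase nodes parent k (j : Int) = 0) → j < value.length)
instance (nodes : Int) (parent : List Int) (value : List Int) : Decidable (Pre_deleteTreeNodes nodes parent value) := by unfold Pre_deleteTreeNodes; infer_instance

def pvWitness_deleteTreeNodes : Int × List Int × List Int := (3, [-1, 0, 0], [1, -1, 1])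

def Spec_deleteTreeNodes (nodes : Int) (parent : List Int) (value : List Int) (out : Int) : Prop := out = deleteTreeNodes_alt nodes parent value
instance (nodes : Int) (parent : List Int) (value : List Int) (out : Int) : Decidable (Spec_deleteTreeNodes nodes parent value out) := by unfold Spec_deleteTreeNodes; infer_instance

-- ===== CLAIM (what is proved, stated in full; the proofs are below) =====
def Claim_equal_deleteTreeNodes : Prop := ∀ (nodes : Int) (parent : List Int) (value : List Int), Dom_deleteTreeNodes nodes parent value → Pre_deleteTreeNodes nodes parent value → Spec_deleteTreeNodes nodes parent value (deleteTreeNodes nodes parent value)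

-- ===== LEMMAS AND PROOFS =====

-- iterate laws for pvChase
lemma chase_add (nodes : Int) (parent : List Int) (a b : Nat) (x : Int) :
    pvChase nodes parent (a + b) x = pvChase nodes parent b (pvChase nodes parent a x) := by
  induction a generalizing x with
  | zero => simp [pvChase]
  | succ a ih =>
    have h1 : a + 1 + b = (a + b) + 1 := by omega
    rw [h1]
    show pvChase nodes parent (a + b) (pvStep nodes parent x) = _
    rw [ih (pvStep nodes parent x)]
    rfl

lemma chase_stuck (nodes : Int) (parent : List Int) (x : Int)
    (h : ¬(0 ≤ x ∧ x < nodes)) : ∀ k, pvChase nodes parent k x = x := by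
  intro k
  induction k with
  | zero => rfl
  | succ k ih =>
    show pvChase nodes parent k (pvStep nodes parent x) = x
    rw [pvStep, if_neg h]
    exact ih

lemma chase_succ_out (nodes : Int) (parent : List Int) (k : Nat) (x : Int) :
    pvChase nodes parent (k + 1) x = pvStep nodes parent (pvChase nodes parent k x) := by
  rw [chase_add nodes parent k 1 x]
  rfl

-- all chain elements before reaching 0 are in range
lemma chase_in_range (nodes : Int) (parent : List Int) (hn : 0 < nodes) (x : Int) (k : Nat)
    (hx : pvChase nodes parent k x = 0) :
    ∀ s ≤ k, 0 ≤ pvChase nodes parent s x ∧ pvChase nodes parent s x < nodes := by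
  intro s hs
  by_contra hc
  have hstuck := chase_stuck nodes parent (pvChase nodes parent s x) hc
  have : pvChase nodes parent k x = pvChase nodes parent s x := by
    have h1 : k = s + (k - s) := by omega
    rw [h1, chase_add]
    exact hstuck (k - s)
  rw [hx] at this
  exact hc (by rw [← this]; exact ⟨le_refl 0, hn⟩)

-- depth of a node: least number of parent steps to reach 0 (proof-side only)
noncomputable def pvDep (nodes : Int) (parent : List Int) (x : Int) : Nat :=
  sInf {k | pvChase nodes parent k x = 0}

-- a node whose chain reaches 0
def pvVis (nodes : Int) (parent : List Int) (x : Int) : Prop :=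
  ∃ k, pvChase nodes parent k x = 0

lemma chase_dep (nodes : Int) (parent : List Int) (x : Int) (h : pvVis nodes parent x) :
    pvChase nodes parent (pvDep nodes parent x) x = 0 :=
  Nat.sInf_mem h

lemma dep_le (nodes : Int) (parent : List Int) (x : Int) (m : Nat)
    (h : pvChase nodes parent m x = 0) : pvDep nodes parent x ≤ m :=
  Nat.sInf_le h

-- two distinct positions before the (minimal) depth carry distinct values
lemma chase_ne_of_lt (nodes : Int) (parent : List Int) (x : Int) (hv : pvVis nodes parent x)
    (a b : Nat) (hab : a < b) (hb : b ≤ pvDep nodes parent x) :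
    pvChase nodes parent a x ≠ pvChase nodes parent b x := by
  intro he
  have hm := chase_dep nodes parent x hv
  have h3 : b + (pvDep nodes parent x - b) = pvDep nodes parent x := by omega
  have h1 : pvChase nodes parent (a + (pvDep nodes parent x - b)) x = 0 := by
    rw [chase_add, he, ← chase_add, h3, hm]
  have := dep_le nodes parent x _ h1
  omega

-- pigeonhole: the minimal depth is < nodes
lemma dep_lt (nodes : Int) (parent : List Int) (hn : 0 < nodes) (x : Int)
    (hv : pvVis nodes parent x) : pvDep nodes parent x < nodes.toNat := by
  have hm := chase_dep nodes parent x hv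
  have hrange := chase_in_range nodes parent hn x (pvDep nodes parent x) hm
  have hcard : (Finset.range (pvDep nodes parent x + 1)).card ≤ (Finset.range nodes.toNat).card := by
    apply Finset.card_le_card_of_injOn (fun k => (pvChase nodes parent k x).toNat)
    · intro a ha
      rw [Finset.mem_coe, Finset.mem_range] at ha
      rw [Finset.mem_coe, Finset.mem_range]
      dsimp only
      have := hrange a (by omega)
      omega
    · intro a ha b hb he
      dsimp only at he
      rw [Finset.mem_coe, Finset.mem_range] at ha hb
      have hva := hrange a (by omega)
      have hvb := hrange b (by omega)
      have heq : pvChase nodes parent a x = pvChase nodes parent b x := by omega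
      by_contra hne
      rcases Nat.lt_or_ge a b with h | h
      · exact chase_ne_of_lt nodes parent x hv a b h (by omega) heq
      · exact chase_ne_of_lt nodes parent x hv b a (by omega) (by omega) heq.symm
  rw [Finset.card_range, Finset.card_range] at hcard
  omega

-- under Pre_'s clause 3 the root lies on no parent cycle at all
lemma no_cycle_zero (nodes : Int) (parent : List Int) (hn : 0 < nodes)
    (h3 : ∀ k < nodes.toNat + 1, 0 < k → pvChase nodes parent k 0 ≠ 0) :
    ∀ k, 0 < k → pvChase nodes parent k 0 ≠ 0 := by
  intro k hk hck
  have hne : {j | 0 < j ∧ pvChase nodes parent j 0 = 0}.Nonempty := ⟨k, hk, hck⟩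
  obtain ⟨hm0, hmc⟩ := Nat.sInf_mem hne
  set m := sInf {j | 0 < j ∧ pvChase nodes parent j 0 = 0} with hmdef
  have hrange := chase_in_range nodes parent hn 0 m hmc
  have hdistinct : ∀ a b, 1 ≤ a → a < b → b ≤ m →
      pvChase nodes parent a 0 ≠ pvChase nodes parent b 0 := by
    intro a b ha hab hb he
    have hb3 : b + (m - b) = m := by omega
    have h1 : pvChase nodes parent (a + (m - b)) 0 = 0 := by
      rw [chase_add, he, ← chase_add, hb3, hmc]
    have := Nat.sInf_le (show a + (m - b) ∈ {j | 0 < j ∧ pvChase nodes parent j 0 = 0} from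
      ⟨by omega, h1⟩)
    omega
  have hcard : (Finset.Icc 1 m).card ≤ (Finset.range nodes.toNat).card := by
    apply Finset.card_le_card_of_injOn (fun k => (pvChase nodes parent k 0).toNat)
    · intro a ha
      rw [Finset.mem_coe, Finset.mem_Icc] at ha
      rw [Finset.mem_coe, Finset.mem_range]
      dsimp only
      have := hrange a (by omega)
      omega
    · intro a ha b hb he
      dsimp only at he
      rw [Finset.mem_coe, Finset.mem_Icc] at ha hb
      have hva := hrange a (by omega)
      have hvb := hrange b (by omega)
      have heq : pvChase nodes parent a 0 = pvChase nodes parent b 0 := by omega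
      by_contra hne'
      rcases Nat.lt_or_ge a b with h | h
      · exact hdistinct a b (by omega) h (by omega) heq
      · exact hdistinct b a (by omega) (by omega) (by omega) heq.symm
  rw [Nat.card_Icc, Finset.card_range] at hcard
  exact h3 m (by omega) hm0 hmc

-- children of m: the j < n with parent[j] = m
def pvKids (n : Nat) (parent : List Int) (m : Nat) : List Nat :=
  (List.range n).filter (fun j => parent.getD j 0 == (m : Int))

lemma pvKids_mem {n : Nat} {parent : List Int} {m j : Nat} (h : j ∈ pvKids n parent m) :
    j < n ∧ parent.getD j 0 = (m : Int) := by
  simp [pvKids, List.mem_filter, List.mem_range] at h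
  tauto

-- the adjacency dict built by both ports holds exactly the kids lists
lemma childMap_getD (nodes : Int) (parent : List Int) (m : Nat) :
    (pvChildMap nodes parent).getD (m : Int) [] =
      (pvKids nodes.toNat parent m).map (fun j : Nat => (j : Int)) := by
  have hrange : PySem.List.pyRange 0 nodes 1 = (List.range nodes.toNat).map (fun k : Nat => (k:Int)) := by
    rw [PySem.List.pyRange_one]
    simp only [Int.sub_zero]
    apply List.map_congr_left
    intro a _
    omega
  rw [pvChildMap, hrange, List.foldl_map, pvKids]
  simp only [PySem.List.pyGetD_natCast]
  have aux : ∀ i : Nat,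
      ((List.range i).foldl
        (fun d (k : Nat) =>
          if parent.getD k 0 ≠ -1 then
            d.modify (parent.getD k 0) [] (· ++ [(k:Int)])
          else d)
        PySem.Dict.empty).getD (m:Int) []
      = ((List.range i).filter (fun j => parent.getD j 0 == (m:Int))).map
          (fun j : Nat => (j:Int)) := by
    intro i
    induction i with
    | zero => simp
    | succ i ih =>
      rw [List.range_succ, List.foldl_append, List.filter_append, List.foldl_cons, List.foldl_nil,
        List.filter_cons, List.filter_nil]
      by_cases hp : parent.getD i 0 = -1
      · rw [if_neg (by rw [hp]; exact not_not_intro rfl)]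
        have hne : (parent.getD i 0 == (m:Int)) = false := by
          rw [hp]
          exact beq_eq_false_iff_ne.mpr (by omega)
        rw [hne, if_neg (by simp), List.append_nil]
        exact ih
      · rw [if_pos hp]
        rw [PySem.Dict.getD_modify]
        by_cases hmeq : (m:Int) = parent.getD i 0
        · have hb : (parent.getD i 0 == (m:Int)) = true := beq_iff_eq.mpr hmeq.symm
          rw [hb, if_pos rfl, ← hmeq, ih, List.map_append]
          simp
        · rw [if_neg hmeq]
          have hb : (parent.getD i 0 == (m:Int)) = false :=
            beq_eq_false_iff_ne.mpr (fun h => hmeq h.symm)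
          rw [hb, if_neg (by simp), List.append_nil]
          exact ih
  exact aux nodes.toNat

-- every value list of the adjacency dict has length ≤ nodes.toNat
lemma childMap_len (nodes : Int) (parent : List Int) (q : Int) :
    ((pvChildMap nodes parent).getD q []).length ≤ nodes.toNat := by
  have aux : ∀ (L : List Int) (d : PySem.Dict Int (List Int)) (c : Nat),
      (∀ p : Int, (d.getD p []).length ≤ c) →
      ∀ p : Int, ((L.foldl
        (fun d i =>
          if PySem.List.pyGetD parent i 0 ≠ -1 then
            d.modify (PySem.List.pyGetD parent i 0) [] (· ++ [i])
          else d) d).getD p []).length ≤ c + L.length := by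
    intro L
    induction L with
    | nil => intro d c h p; simpa using h p
    | cons i L ihL =>
      intro d c h p
      rw [List.foldl_cons]
      have hstep : ∀ p : Int,
          (((if PySem.List.pyGetD parent i 0 ≠ -1 then
              d.modify (PySem.List.pyGetD parent i 0) [] (· ++ [i])
            else d)).getD p []).length ≤ c + 1 := by
        intro p
        split
        · rw [PySem.Dict.getD_modify]
          split
          · rw [List.length_append]
            have := h (PySem.List.pyGetD parent i 0)
            simp
            omega
          · have := h p
            omega
        · have := h p
          omega
      have := ihL _ (c + 1) hstep p
      simp only [List.length_cons] at this ⊢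
      omega
  have h0 : ∀ p : Int, ((PySem.Dict.empty (κ := Int) (ν := List Int)).getD p []).length ≤ 0 := by
    intro p
    simp
  have := aux (PySem.List.pyRange 0 nodes 1) PySem.Dict.empty 0 h0 q
  rw [PySem.List.length_pyRange_one] at this
  have h2 : 0 + (nodes - 0).toNat = nodes.toNat := by omega
  rw [h2] at this
  exact this

-- subtree membership: q's chain passes through node on its way to 0
def pvSub (nodes : Int) (parent : List Int) (node q : Nat) : Prop :=
  pvVis nodes parent (q : Int) ∧
  pvChase nodes parent (pvDep nodes parent (q : Int) - pvDep nodes parent (node : Int)) (q : Int)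
    = (node : Int)

lemma pvSub_refl (nodes : Int) (parent : List Int) (node : Nat)
    (h : pvVis nodes parent (node : Int)) : pvSub nodes parent node node := by
  exact ⟨h, by simp [pvChase]⟩

-- a child of a visited node is visited one level deeper
lemma kid_vis (nodes : Int) (parent : List Int) (hn : 0 < nodes)
    (hnc : ∀ k, 0 < k → pvChase nodes parent k 0 ≠ 0)
    (node : Nat) (hv : pvVis nodes parent (node : Int))
    {j : Nat} (hj : j ∈ pvKids nodes.toNat parent node) :
    pvVis nodes parent (j : Int) ∧
      pvDep nodes parent (j : Int) = pvDep nodes parent (node : Int) + 1 := by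
  obtain ⟨hjn, hpj⟩ := pvKids_mem hj
  have hstep : pvStep nodes parent (j : Int) = (node : Int) := by
    rw [pvStep, if_pos ⟨by omega, by omega⟩]
    simpa using hpj
  set d := pvDep nodes parent (node : Int) with hd
  have hchain : pvChase nodes parent (d + 1) (j : Int) = 0 := by
    have h1 : (d + 1) = 1 + d := by omega
    rw [h1, chase_add]
    show pvChase nodes parent d (pvChase nodes parent 0 (pvStep nodes parent (j:Int))) = 0
    simp only [pvChase, hstep]
    exact chase_dep nodes parent _ hv
  refine ⟨⟨d + 1, hchain⟩, ?_⟩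
  have hub : pvDep nodes parent (j : Int) ≤ d + 1 := dep_le nodes parent _ _ hchain
  set e := pvDep nodes parent (j : Int) with he
  have hce : pvChase nodes parent e (j : Int) = 0 := chase_dep nodes parent _ ⟨d + 1, hchain⟩
  rcases Nat.eq_zero_or_pos e with h0 | hpos
  · exfalso
    rw [h0] at hce
    simp only [pvChase] at hce
    have hj0 : j = 0 := by omega
    rw [hj0] at hchain
    exact hnc (d + 1) (by omega) (by simpa using hchain)
  · have h2 : pvChase nodes parent (e - 1) (node : Int) = 0 := by
      have h3 : e = 1 + (e - 1) := by omega
      rw [h3, chase_add] at hce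
      show pvChase nodes parent (e-1) ((node : Int)) = 0
      have : pvChase nodes parent 1 (j : Int) = (node : Int) := by
        show pvChase nodes parent 0 (pvStep nodes parent (j:Int)) = _
        simp [pvChase, hstep]
      rw [this] at hce
      exact hce
    have := dep_le nodes parent (node : Int) _ h2
    omega

-- decomposition of subtree membership: root or inside some child's subtree
lemma pvSub_decomp (nodes : Int) (parent : List Int) (hn : 0 < nodes)
    (hnc : ∀ k, 0 < k → pvChase nodes parent k 0 ≠ 0)
    (node : Nat) (hnlt : node < nodes.toNat) (hv : pvVis nodes parent (node : Int)) (q : Nat) :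
    pvSub nodes parent node q ↔
      (q = node ∨ ∃ c ∈ pvKids nodes.toNat parent node, pvSub nodes parent c q) := by
  have hchn : pvChase nodes parent (pvDep nodes parent (node : Int)) (node : Int) = 0 :=
    chase_dep nodes parent _ hv
  constructor
  · rintro ⟨hq, hchaseq⟩
    by_cases hqn : q = node
    · exact Or.inl hqn
    right
    have hchq : pvChase nodes parent (pvDep nodes parent (q : Int)) (q : Int) = 0 :=
      chase_dep nodes parent _ hq
    have hgt : pvDep nodes parent (node : Int) < pvDep nodes parent (q : Int) := by
      by_contra h
      have h0 : pvDep nodes parent (q : Int) - pvDep nodes parent (node : Int) = 0 := by omega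
      rw [h0] at hchaseq
      rw [show pvChase nodes parent 0 (q : Int) = (q : Int) from rfl] at hchaseq
      exact hqn (by exact_mod_cast hchaseq)
    have hxr := chase_in_range nodes parent hn (q : Int) _ hchq
      (pvDep nodes parent (q : Int) - pvDep nodes parent (node : Int) - 1) (by omega)
    have hstepx : pvStep nodes parent
        (pvChase nodes parent (pvDep nodes parent (q : Int) - pvDep nodes parent (node : Int) - 1) (q : Int))
        = (node : Int) := by
      rw [← chase_succ_out]
      have h1 : pvDep nodes parent (q : Int) - pvDep nodes parent (node : Int) - 1 + 1
          = pvDep nodes parent (q : Int) - pvDep nodes parent (node : Int) := by omega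
      rw [h1]
      exact hchaseq
    have hpx : parent.getD (pvChase nodes parent
        (pvDep nodes parent (q : Int) - pvDep nodes parent (node : Int) - 1) (q : Int)).toNat 0
        = (node : Int) := by
      rw [pvStep, if_pos hxr] at hstepx
      exact hstepx
    have hxc : (((pvChase nodes parent
        (pvDep nodes parent (q : Int) - pvDep nodes parent (node : Int) - 1) (q : Int)).toNat : Nat) : Int)
        = pvChase nodes parent (pvDep nodes parent (q : Int) - pvDep nodes parent (node : Int) - 1) (q : Int) := by
      omega
    have hmem : (pvChase nodes parent
        (pvDep nodes parent (q : Int) - pvDep nodes parent (node : Int) - 1) (q : Int)).toNat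
        ∈ pvKids nodes.toNat parent node := by
      rw [pvKids, List.mem_filter, List.mem_range]
      refine ⟨by omega, ?_⟩
      rw [hpx]
      simp
    have hchase1 : pvChase nodes parent 1
        (pvChase nodes parent (pvDep nodes parent (q : Int) - pvDep nodes parent (node : Int) - 1) (q : Int))
        = (node : Int) := hstepx
    have hvx : pvVis nodes parent
        (pvChase nodes parent (pvDep nodes parent (q : Int) - pvDep nodes parent (node : Int) - 1) (q : Int)) := by
      refine ⟨1 + pvDep nodes parent (node : Int), ?_⟩
      rw [chase_add, hchase1]
      exact hchn
    have hdx_le : pvDep nodes parent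
        (pvChase nodes parent (pvDep nodes parent (q : Int) - pvDep nodes parent (node : Int) - 1) (q : Int))
        ≤ pvDep nodes parent (node : Int) + 1 := by
      apply dep_le
      have h1 : pvDep nodes parent (node : Int) + 1 = 1 + pvDep nodes parent (node : Int) := by omega
      rw [h1, chase_add, hchase1]
      exact hchn
    have hdx_ge : pvDep nodes parent (node : Int) + 1 ≤ pvDep nodes parent
        (pvChase nodes parent (pvDep nodes parent (q : Int) - pvDep nodes parent (node : Int) - 1) (q : Int)) := by
      have h1 : pvChase nodes parent
          ((pvDep nodes parent (q : Int) - pvDep nodes parent (node : Int) - 1) +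
            pvDep nodes parent (pvChase nodes parent
              (pvDep nodes parent (q : Int) - pvDep nodes parent (node : Int) - 1) (q : Int))) (q : Int)
          = 0 := by
        rw [chase_add]
        exact chase_dep nodes parent _ hvx
      have := dep_le nodes parent (q : Int) _ h1
      omega
    refine ⟨_, hmem, hq, ?_⟩
    rw [hxc]
    have h9 : pvDep nodes parent (q : Int) - pvDep nodes parent
        (pvChase nodes parent (pvDep nodes parent (q : Int) - pvDep nodes parent (node : Int) - 1) (q : Int))
        = pvDep nodes parent (q : Int) - pvDep nodes parent (node : Int) - 1 := by omega
    rw [h9]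
  · rintro (rfl | ⟨c, hc, hsub⟩)
    · exact pvSub_refl _ _ _ hv
    · obtain ⟨hvq, hchq⟩ := hsub
      obtain ⟨hck, hpc⟩ := pvKids_mem hc
      obtain ⟨hvc, hdc⟩ := kid_vis nodes parent hn hnc node hv hc
      refine ⟨hvq, ?_⟩
      have hge : pvDep nodes parent (c : Int) ≤ pvDep nodes parent (q : Int) := by
        by_contra h
        have h0 : pvDep nodes parent (q : Int) - pvDep nodes parent (c : Int) = 0 := by omega
        rw [h0] at hchq
        rw [show pvChase nodes parent 0 (q : Int) = (q : Int) from rfl] at hchq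
        have hqc : q = c := by exact_mod_cast hchq
        rw [hqc] at h
        omega
      have h1 : pvDep nodes parent (q : Int) - pvDep nodes parent (node : Int)
          = (pvDep nodes parent (q : Int) - pvDep nodes parent (c : Int)) + 1 := by omega
      rw [h1, chase_succ_out, hchq, pvStep, if_pos ⟨by omega, by omega⟩]
      simpa using hpc

-- fueled subtree size over the adjacency dict (what the stack machine's fuel accounting counts)
def pvSzF (ch : PySem.Dict Int (List Int)) : Nat → Int → Nat
  | 0, _ => 1
  | f+1, node => 1 + ((ch.getD node []).map (fun c => pvSzF ch f c)).sum

lemma szF_bound (ch : PySem.Dict Int (List Int)) (n : Nat)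
    (hlen : ∀ q, (ch.getD q []).length ≤ n) :
    ∀ (f : Nat) (x : Int), pvSzF ch f x ≤ (n + 1) ^ f := by
  intro f
  induction f with
  | zero => intro x; simp [pvSzF]
  | succ f ih =>
    intro x
    have hsum : ((ch.getD x []).map (fun c => pvSzF ch f c)).sum ≤ n * (n + 1) ^ f := by
      calc ((ch.getD x []).map (fun c => pvSzF ch f c)).sum
          ≤ ((ch.getD x []).map (fun c => pvSzF ch f c)).length * ((n+1)^f) := by
            apply List.sum_le_card_nsmul
            intro y hy
            obtain ⟨c, _, rfl⟩ := List.mem_map.mp hy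
            exact ih c
        _ ≤ n * (n + 1) ^ f := by
            have := hlen x
            simp only [List.length_map]
            exact Nat.mul_le_mul_right _ this
    have hpow : 1 ≤ (n + 1) ^ f := Nat.one_le_pow _ _ (by omega)
    have : (n + 1) ^ (f + 1) = n * (n + 1) ^ f + (n + 1) ^ f := by ring
    simp only [pvSzF]
    omega

-- stability of the fueled dfs and size once the fuel covers n - depth
lemma dfsA_stable (nodes : Int) (parent value : List Int)
    (ch : PySem.Dict Int (List Int))
    (hch : ∀ m : Nat, ch.getD (m : Int) [] = (pvKids nodes.toNat parent m).map (fun j : Nat => (j : Int)))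
    (hn : 0 < nodes) (hnc : ∀ k, 0 < k → pvChase nodes parent k 0 ≠ 0) :
    ∀ (d node : Nat), node < nodes.toNat → pvVis nodes parent (node : Int) →
      nodes.toNat - pvDep nodes parent (node : Int) = d →
      ∀ f1 f2, nodes.toNat - pvDep nodes parent (node : Int) ≤ f1 →
        nodes.toNat - pvDep nodes parent (node : Int) ≤ f2 →
        pvDfsA ch value f1 (node : Int) = pvDfsA ch value f2 (node : Int) := by
  intro d
  induction d using Nat.strong_induction_on with
  | _ d ih =>
    intro node hnlt hv hd f1 f2 hf1 hf2
    have hdep := dep_lt nodes parent hn _ hv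
    obtain ⟨a, rfl⟩ : ∃ a, f1 = a + 1 := ⟨f1 - 1, by omega⟩
    obtain ⟨b, rfl⟩ : ∃ b, f2 = b + 1 := ⟨f2 - 1, by omega⟩
    simp only [pvDfsA, hch node, List.foldl_map]
    have hfold :
        (pvKids nodes.toNat parent node).foldl
          (fun (acc : Int × Int) (j : Nat) =>
            (acc.1 + (pvDfsA ch value a (j : Int)).1, acc.2 + (pvDfsA ch value a (j : Int)).2))
          (PySem.List.pyGetD value (node : Int) 0, 1)
        = (pvKids nodes.toNat parent node).foldl
          (fun (acc : Int × Int) (j : Nat) =>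
            (acc.1 + (pvDfsA ch value b (j : Int)).1, acc.2 + (pvDfsA ch value b (j : Int)).2))
          (PySem.List.pyGetD value (node : Int) 0, 1) := by
      apply PySem.List.foldl_congr_mem
      intro acc j hj
      obtain ⟨hvj, hdj⟩ := kid_vis nodes parent hn hnc node hv hj
      have hjlt := (pvKids_mem hj).1
      have hdjlt := dep_lt nodes parent hn _ hvj
      have := ih (nodes.toNat - pvDep nodes parent (j : Int)) (by omega) j hjlt hvj rfl a b
        (by omega) (by omega)
      rw [this]
    rw [hfold]

lemma szF_stable (nodes : Int) (parent : List Int)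
    (ch : PySem.Dict Int (List Int))
    (hch : ∀ m : Nat, ch.getD (m : Int) [] = (pvKids nodes.toNat parent m).map (fun j : Nat => (j : Int)))
    (hn : 0 < nodes) (hnc : ∀ k, 0 < k → pvChase nodes parent k 0 ≠ 0) :
    ∀ (d node : Nat), node < nodes.toNat → pvVis nodes parent (node : Int) →
      nodes.toNat - pvDep nodes parent (node : Int) = d →
      ∀ f1 f2, nodes.toNat - pvDep nodes parent (node : Int) ≤ f1 →
        nodes.toNat - pvDep nodes parent (node : Int) ≤ f2 →
        pvSzF ch f1 (node : Int) = pvSzF ch f2 (node : Int) := by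
  intro d
  induction d using Nat.strong_induction_on with
  | _ d ih =>
    intro node hnlt hv hd f1 f2 hf1 hf2
    have hdep := dep_lt nodes parent hn _ hv
    obtain ⟨a, rfl⟩ : ∃ a, f1 = a + 1 := ⟨f1 - 1, by omega⟩
    obtain ⟨b, rfl⟩ : ∃ b, f2 = b + 1 := ⟨f2 - 1, by omega⟩
    simp only [pvSzF, hch node, List.map_map]
    congr 2
    apply List.map_congr_left
    intro j hj
    obtain ⟨hvj, hdj⟩ := kid_vis nodes parent hn hnc node hv hj
    have hjlt := (pvKids_mem hj).1
    have hdjlt := dep_lt nodes parent hn _ hvj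
    have := ih (nodes.toNat - pvDep nodes parent (j : Int)) (by omega) j hjlt hvj rfl a b
      (by omega) (by omega)
    simpa using this

-- the fold over a node's children of the canonical dfs values
def pvFoldC (nodes : Int) (parent value : List Int) (ch : PySem.Dict Int (List Int)) (node : Nat) :
    Int × Int :=
  (pvKids nodes.toNat parent node).foldl
    (fun (acc : Int × Int) (j : Nat) =>
      (acc.1 + (pvDfsA ch value nodes.toNat (j : Int)).1,
       acc.2 + (pvDfsA ch value nodes.toNat (j : Int)).2))
    (PySem.List.pyGetD value (node : Int) 0, 1)

lemma dfsA_unfold (nodes : Int) (parent value : List Int) (ch : PySem.Dict Int (List Int))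
    (hch : ∀ m : Nat, ch.getD (m : Int) [] = (pvKids nodes.toNat parent m).map (fun j : Nat => (j : Int)))
    (hn : 0 < nodes) (hnc : ∀ k, 0 < k → pvChase nodes parent k 0 ≠ 0)
    (node : Nat) (hnlt : node < nodes.toNat) (hv : pvVis nodes parent (node : Int)) :
    pvDfsA ch value nodes.toNat (node : Int) =
      if (pvFoldC nodes parent value ch node).1 = 0
      then ((pvFoldC nodes parent value ch node).1, 0)
      else pvFoldC nodes parent value ch node := by
  obtain ⟨m, hm⟩ : ∃ m, nodes.toNat = m + 1 := ⟨nodes.toNat - 1, by omega⟩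
  conv_lhs => rw [hm]
  simp only [pvDfsA, hch node, List.foldl_map]
  have hfold :
      (pvKids nodes.toNat parent node).foldl
        (fun (acc : Int × Int) (j : Nat) =>
          (acc.1 + (pvDfsA ch value m (j : Int)).1, acc.2 + (pvDfsA ch value m (j : Int)).2))
        (PySem.List.pyGetD value (node : Int) 0, 1)
      = pvFoldC nodes parent value ch node := by
    rw [pvFoldC]
    apply PySem.List.foldl_congr_mem
    intro acc j hj
    obtain ⟨hvj, hdj⟩ := kid_vis nodes parent hn hnc node hv hj
    have hjlt := (pvKids_mem hj).1
    have hdjlt := dep_lt nodes parent hn _ hvj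
    have := dfsA_stable nodes parent value ch hch hn hnc
      (nodes.toNat - pvDep nodes parent (j : Int)) j hjlt hvj rfl m nodes.toNat
      (by omega) (by omega)
    rw [this]
  rw [hfold]

lemma szF_unfold (nodes : Int) (parent : List Int) (ch : PySem.Dict Int (List Int))
    (hch : ∀ m : Nat, ch.getD (m : Int) [] = (pvKids nodes.toNat parent m).map (fun j : Nat => (j : Int)))
    (hn : 0 < nodes) (hnc : ∀ k, 0 < k → pvChase nodes parent k 0 ≠ 0)
    (node : Nat) (hnlt : node < nodes.toNat) (hv : pvVis nodes parent (node : Int)) :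
    pvSzF ch nodes.toNat (node : Int) =
      1 + ((pvKids nodes.toNat parent node).map
            (fun c : Nat => pvSzF ch nodes.toNat (c : Int))).sum := by
  obtain ⟨m, hm⟩ : ∃ m, nodes.toNat = m + 1 := ⟨nodes.toNat - 1, by omega⟩
  conv_lhs => rw [hm]
  simp only [pvSzF, hch node, List.map_map]
  congr 2
  apply List.map_congr_left
  intro j hj
  obtain ⟨hvj, hdj⟩ := kid_vis nodes parent hn hnc node hv hj
  have hjlt := (pvKids_mem hj).1
  have hdjlt := dep_lt nodes parent hn _ hvj
  have := szF_stable nodes parent ch hch hn hnc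
    (nodes.toNat - pvDep nodes parent (j : Int)) j hjlt hvj rfl m nodes.toNat
    (by omega) (by omega)
  simpa using this

-- one visited subtree processed by the stack machine: consumes exactly 2 × its size of fuel and
-- records the canonical dfs values on exactly the subtree's nodes
lemma runB_step (nodes : Int) (parent value : List Int) (ch : PySem.Dict Int (List Int))
    (hch : ∀ m : Nat, ch.getD (m : Int) [] = (pvKids nodes.toNat parent m).map (fun j : Nat => (j : Int)))
    (hn : 0 < nodes) (hnc : ∀ k, 0 < k → pvChase nodes parent k 0 ≠ 0) :
    ∀ (d node : Nat), node < nodes.toNat → pvVis nodes parent (node : Int) →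
      nodes.toNat - pvDep nodes parent (node : Int) = d →
    ∀ (fuel : Nat) (rest : List (Int × Bool)) (total kept : PySem.Dict Int Int),
    ∃ total' kept',
      pvRunB ch value (2 * pvSzF ch nodes.toNat (node : Int) + fuel) (((node : Int), false) :: rest) total kept
        = pvRunB ch value fuel rest total' kept'
      ∧ (∀ q : Int,
          ((0 ≤ q ∧ q.toNat < nodes.toNat ∧ pvSub nodes parent node q.toNat) →
            total'.getD q 0 = (pvDfsA ch value nodes.toNat q).1 ∧
            kept'.getD q 0 = (pvDfsA ch value nodes.toNat q).2)
          ∧ (¬(0 ≤ q ∧ q.toNat < nodes.toNat ∧ pvSub nodes parent node q.toNat) →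
            total'.getD q 0 = total.getD q 0 ∧ kept'.getD q 0 = kept.getD q 0)) := by
  intro d
  induction d using Nat.strong_induction_on with
  | _ d ih =>
    intro node hnlt hv hd
    have hdep := dep_lt nodes parent hn _ hv
    -- a block of pending sibling subtrees on top of the stack
    have inner : ∀ (ds : List Nat),
        (∀ c ∈ ds, c < nodes.toNat ∧ pvVis nodes parent (c : Int) ∧
          pvDep nodes parent (c : Int) = pvDep nodes parent (node : Int) + 1) →
        ∀ (fuel : Nat) (rest : List (Int × Bool)) (total kept : PySem.Dict Int Int),
        ∃ total' kept',
          pvRunB ch value (2 * ((ds.map (fun c : Nat => pvSzF ch nodes.toNat (c : Int))).sum) + fuel)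
              (ds.map (fun c : Nat => ((c : Int), false)) ++ rest) total kept
            = pvRunB ch value fuel rest total' kept'
          ∧ (∀ q : Int,
              ((0 ≤ q ∧ q.toNat < nodes.toNat ∧ ∃ c ∈ ds, pvSub nodes parent c q.toNat) →
                total'.getD q 0 = (pvDfsA ch value nodes.toNat q).1 ∧
                kept'.getD q 0 = (pvDfsA ch value nodes.toNat q).2)
              ∧ (¬(0 ≤ q ∧ q.toNat < nodes.toNat ∧ ∃ c ∈ ds, pvSub nodes parent c q.toNat) →
                total'.getD q 0 = total.getD q 0 ∧ kept'.getD q 0 = kept.getD q 0)) := by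
      intro ds
      induction ds with
      | nil =>
        intro _ fuel rest total kept
        refine ⟨total, kept, by simp, ?_⟩
        intro q
        constructor
        · rintro ⟨_, _, c, hc, _⟩
          exact absurd hc (List.not_mem_nil)
        · intro _
          exact ⟨rfl, rfl⟩
      | cons c ds ihl =>
        intro hmem fuel rest total kept
        obtain ⟨hck, hvc, hdc⟩ := hmem c List.mem_cons_self
        obtain ⟨t1, k1, he1, hp1⟩ :=
          ih (nodes.toNat - pvDep nodes parent (c : Int)) (by omega) c hck hvc rfl
            (2 * ((ds.map (fun c : Nat => pvSzF ch nodes.toNat (c : Int))).sum) + fuel)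
            (ds.map (fun c : Nat => ((c : Int), false)) ++ rest) total kept
        obtain ⟨t2, k2, he2, hp2⟩ :=
          ihl (fun x hx => hmem x (List.mem_cons_of_mem c hx)) fuel rest t1 k1
        refine ⟨t2, k2, ?_, ?_⟩
        · have harith : 2 * (((c :: ds).map (fun c : Nat => pvSzF ch nodes.toNat (c : Int))).sum) + fuel
              = 2 * pvSzF ch nodes.toNat (c : Int) +
                (2 * ((ds.map (fun c : Nat => pvSzF ch nodes.toNat (c : Int))).sum) + fuel) := by
            simp only [List.map_cons, List.sum_cons]
            ring
          rw [harith, List.map_cons, List.cons_append, he1, he2]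
        · intro q
          constructor
          · rintro ⟨hq0, hqn, x, hx, hsx⟩
            rcases List.mem_cons.mp hx with rfl | hx'
            · -- q in c's subtree; value set by c's step, preserved or re-set by the block
              by_cases hds : ∃ y ∈ ds, pvSub nodes parent y q.toNat
              · exact (hp2 q).1 ⟨hq0, hqn, hds⟩
              · have hkeep := (hp2 q).2 (by rintro ⟨_, _, y, hy, hsy⟩; exact hds ⟨y, hy, hsy⟩)
                have hset := (hp1 q).1 ⟨hq0, hqn, hsx⟩
                exact ⟨hkeep.1.trans hset.1, hkeep.2.trans hset.2⟩
            · exact (hp2 q).1 ⟨hq0, hqn, x, hx', hsx⟩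
          · intro hneg
            have hnds : ¬(0 ≤ q ∧ q.toNat < nodes.toNat ∧ ∃ y ∈ ds, pvSub nodes parent y q.toNat) := by
              rintro ⟨hq0, hqn, y, hy, hsy⟩
              exact hneg ⟨hq0, hqn, y, List.mem_cons_of_mem c hy, hsy⟩
            have hnc1 : ¬(0 ≤ q ∧ q.toNat < nodes.toNat ∧ pvSub nodes parent c q.toNat) := by
              rintro ⟨hq0, hqn, hsc⟩
              exact hneg ⟨hq0, hqn, c, List.mem_cons_self, hsc⟩
            have h2 := (hp2 q).2 hnds
            have h1 := (hp1 q).2 hnc1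
            exact ⟨h2.1.trans h1.1, h2.2.trans h1.2⟩
    -- now the node itself
    intro fuel rest total kept
    have hsz := szF_unfold nodes parent ch hch hn hnc node hnlt hv
    have hsum_rev : (((pvKids nodes.toNat parent node).reverse.map
          (fun c : Nat => pvSzF ch nodes.toNat (c : Int))).sum)
        = (((pvKids nodes.toNat parent node).map (fun c : Nat => pvSzF ch nodes.toNat (c : Int))).sum) := by
      rw [List.map_reverse, List.sum_reverse]
    have hkids_prop : ∀ c ∈ (pvKids nodes.toNat parent node).reverse,
        c < nodes.toNat ∧ pvVis nodes parent (c : Int) ∧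
          pvDep nodes parent (c : Int) = pvDep nodes parent (node : Int) + 1 := by
      intro c hc
      have hc' := List.mem_reverse.mp hc
      obtain ⟨hvc, hdc⟩ := kid_vis nodes parent hn hnc node hv hc'
      exact ⟨(pvKids_mem hc').1, hvc, hdc⟩
    obtain ⟨t1, k1, he1, hp1⟩ := inner ((pvKids nodes.toNat parent node).reverse) hkids_prop
      (fuel + 1) (((node : Int), true) :: rest) total kept
    have hstack : ((ch.getD ((node : Int)) []).reverse.map (fun c => (c, false)))
        = (pvKids nodes.toNat parent node).reverse.map (fun c : Nat => ((c : Int), false)) := by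
      rw [hch node, ← List.map_reverse, List.map_map]
      rfl
    have hfold : ((ch.getD ((node : Int)) []).foldl
          (fun (acc : Int × Int) c => (acc.1 + t1.getD c 0, acc.2 + k1.getD c 0))
          (PySem.List.pyGetD value (node : Int) 0, (1 : Int)))
        = pvFoldC nodes parent value ch node := by
      rw [hch node, List.foldl_map, pvFoldC]
      apply PySem.List.foldl_congr_mem
      intro acc j hj
      have hjm := pvKids_mem hj
      have hc1 : (0 : Int) ≤ (j : Int) := by omega
      have hc2 : ((j : Int)).toNat < nodes.toNat := by
        rw [Int.toNat_natCast]; exact hjm.1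
      have hc3 : ∃ c ∈ (pvKids nodes.toNat parent node).reverse,
          pvSub nodes parent c ((j : Int)).toNat := by
        rw [Int.toNat_natCast]
        exact ⟨j, List.mem_reverse.mpr hj,
          pvSub_refl nodes parent j (kid_vis nodes parent hn hnc node hv hj).1⟩
      have hpos := (hp1 (j : Int)).1 ⟨hc1, hc2, hc3⟩
      rw [hpos.1, hpos.2]
    have harith : 2 * pvSzF ch nodes.toNat (node : Int) + fuel
        = (2 * (((pvKids nodes.toNat parent node).reverse.map
              (fun c : Nat => pvSzF ch nodes.toNat (c : Int))).sum) + (fuel + 1)) + 1 := by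
      rw [hsum_rev, hsz]
      ring
    refine ⟨t1.insert ((node : Int)) (pvFoldC nodes parent value ch node).1,
            k1.insert ((node : Int))
              (if (pvFoldC nodes parent value ch node).1 = 0 then (0 : Int)
               else (pvFoldC nodes parent value ch node).2), ?_, ?_⟩
    · rw [harith]
      simp only [pvRunB]
      rw [if_neg (by simp), hstack, he1]
      simp only [pvRunB]
      rw [if_pos trivial, hfold]
    · intro q
      have hsubnn : pvSub nodes parent node node := pvSub_refl nodes parent node hv
      constructor
      · rintro ⟨hq0, hqn, hsq⟩
        by_cases hqnode : q = ((node : Int))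
        · subst hqnode
          rw [PySem.Dict.getD_insert, PySem.Dict.getD_insert, if_pos rfl, if_pos rfl]
          rw [dfsA_unfold nodes parent value ch hch hn hnc node hnlt hv]
          split <;> simp
        · have hqne : q.toNat ≠ node := by omega
          rcases (pvSub_decomp nodes parent hn hnc node hnlt hv q.toNat).mp hsq with heq | ⟨c, hc, hsc⟩
          · exact absurd heq hqne
          · have hpos := (hp1 q).1 ⟨hq0, hqn, c, List.mem_reverse.mpr hc, hsc⟩
            rw [PySem.Dict.getD_insert, PySem.Dict.getD_insert, if_neg hqnode, if_neg hqnode]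
            exact hpos
      · intro hneg
        have hqnode : q ≠ ((node : Int)) := by
          intro hq
          subst hq
          exact hneg ⟨by omega, by rw [Int.toNat_natCast]; exact hnlt, by rw [Int.toNat_natCast]; exact hsubnn⟩
        have hnds : ¬(0 ≤ q ∧ q.toNat < nodes.toNat ∧
            ∃ c ∈ (pvKids nodes.toNat parent node).reverse, pvSub nodes parent c q.toNat) := by
          rintro ⟨hq0, hqn, c, hc, hsc⟩
          exact hneg ⟨hq0, hqn,
            (pvSub_decomp nodes parent hn hnc node hnlt hv q.toNat).mpr
              (Or.inr ⟨c, List.mem_reverse.mp hc, hsc⟩)⟩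
        have h1 := (hp1 q).2 hnds
        rw [PySem.Dict.getD_insert, PySem.Dict.getD_insert, if_neg hqnode, if_neg hqnode]
        exact h1

lemma runB_nil (ch : PySem.Dict Int (List Int)) (value : List Int) :
    ∀ (fuel : Nat) (total kept : PySem.Dict Int Int),
      pvRunB ch value fuel [] total kept = kept.getD 0 0 := by
  intro fuel total kept
  cases fuel <;> simp [pvRunB]

theorem deleteTreeNodes_spec : Claim_equal_deleteTreeNodes := by
  intro nodes parent value _hdom hpre
  obtain ⟨hlen, hv0len, h3, h4⟩ := hpre
  show deleteTreeNodes nodes parent value = deleteTreeNodes_alt nodes parent value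
  by_cases hN : nodes.toNat = 0
  · -- nodes ≤ 0: the build loop never runs; both traversals just examine node 0 with no children
    have hcm : pvChildMap nodes parent = PySem.Dict.empty := by
      rw [pvChildMap, PySem.List.pyRange_one]
      have h : (nodes - 0).toNat = 0 := by omega
      rw [h]
      simp
    rw [deleteTreeNodes, deleteTreeNodes_alt, hcm, hN]
    norm_num [pvDfsA, pvRunB]
    split <;> rfl
  · have hn : 0 < nodes := by omega
    have hnc := no_cycle_zero nodes parent hn h3
    have hch := childMap_getD nodes parent
    have hv0 : pvVis nodes parent (((0 : Nat) : Int)) := ⟨0, by simp [pvChase]⟩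
    have h0lt : (0 : Nat) < nodes.toNat := by omega
    have hA : deleteTreeNodes nodes parent value
        = (pvDfsA (pvChildMap nodes parent) value nodes.toNat (((0 : Nat) : Int))).2 := by
      rw [deleteTreeNodes]
      have hst := dfsA_stable nodes parent value (pvChildMap nodes parent) hch hn hnc
        (nodes.toNat - pvDep nodes parent (((0 : Nat) : Int))) 0 h0lt hv0 rfl
        (nodes.toNat + 1) nodes.toNat (by omega) (by omega)
      rw [show (((0 : Nat) : Int)) = (0 : Int) by simp] at hst
      rw [hst]
      simp
    have hlenb := childMap_len nodes parent
    have hszb := szF_bound (pvChildMap nodes parent) nodes.toNat hlenb nodes.toNat (((0 : Nat) : Int))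
    have hpow : (nodes.toNat + 1) ^ nodes.toNat ≤ (nodes.toNat + 1) ^ (nodes.toNat + 1) :=
      Nat.pow_le_pow_right (by omega) (by omega)
    obtain ⟨t', k', he, hp⟩ := runB_step nodes parent value (pvChildMap nodes parent) hch hn hnc
      (nodes.toNat - pvDep nodes parent (((0 : Nat) : Int))) 0 h0lt hv0 rfl
      (2 * (nodes.toNat + 1) ^ (nodes.toNat + 1)
        - 2 * pvSzF (pvChildMap nodes parent) nodes.toNat (((0 : Nat) : Int)))
      [] PySem.Dict.empty PySem.Dict.empty
    have hB : deleteTreeNodes_alt nodes parent value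
        = (pvDfsA (pvChildMap nodes parent) value nodes.toNat (((0 : Nat) : Int))).2 := by
      rw [deleteTreeNodes_alt]
      rw [show ((0 : Int), false) = ((((0 : Nat) : Int)), false) by simp]
      rw [show 2 * (nodes.toNat + 1) ^ (nodes.toNat + 1)
          = 2 * pvSzF (pvChildMap nodes parent) nodes.toNat (((0 : Nat) : Int))
            + (2 * (nodes.toNat + 1) ^ (nodes.toNat + 1)
              - 2 * pvSzF (pvChildMap nodes parent) nodes.toNat (((0 : Nat) : Int))) by omega]
      rw [he, runB_nil]
      have hc1 : (0 : Int) ≤ (((0 : Nat) : Int)) := by simp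
      have hc2 : ((((0 : Nat) : Int))).toNat < nodes.toNat := by simpa using h0lt
      have hc3 : pvSub nodes parent 0 ((((0 : Nat) : Int))).toNat := by
        simpa using pvSub_refl nodes parent 0 hv0
      have hpos := (hp (((0 : Nat) : Int))).1 ⟨hc1, hc2, hc3⟩
      rw [show (0 : Int) = (((0 : Nat) : Int)) by simp]
      exact hpos.2
    rw [hA, hB]
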